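-- pv_equiv track=rewrite | github.com/alxwen711/contestSubmissionArchive | codeforces/live contests/2025-4/1056/c copy.py | f
-- ===== SOURCE A (Python) =====
-- def f(s,n):
--     h = [1]*n
--     for k in range(n):
--         if s[k] == "L":
--             for a in range(k+1,n):
--                 h[a] += 1
--         else:
--             for b in range(k):
--                 h[b] += 1
--     return h
-- ===== SOURCE B (Python) =====
-- def f(s, n):
--     total = sum(1 for k in range(n) if s[k] != "L")
--     res = []
--     lefts = 0
--     seen = 0
--     for k in range(n):
--         if s[k] != "L":
--             seen += 1
--         res.append(1 + lefts + total - seen)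
--         if s[k] == "L":
--             lefts += 1
--     return res
-- ===== Notes on version B (the rewrite author's own statement) =====
-- stated objective: faster
-- what changed: replaces the nested range-update loops (each character triggers an O(n) increment sweep) with a single prefix/suffix counting pass: h[i] = 1 + (#'L' before i) + (#non-'L' after i)
import Mathlib
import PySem

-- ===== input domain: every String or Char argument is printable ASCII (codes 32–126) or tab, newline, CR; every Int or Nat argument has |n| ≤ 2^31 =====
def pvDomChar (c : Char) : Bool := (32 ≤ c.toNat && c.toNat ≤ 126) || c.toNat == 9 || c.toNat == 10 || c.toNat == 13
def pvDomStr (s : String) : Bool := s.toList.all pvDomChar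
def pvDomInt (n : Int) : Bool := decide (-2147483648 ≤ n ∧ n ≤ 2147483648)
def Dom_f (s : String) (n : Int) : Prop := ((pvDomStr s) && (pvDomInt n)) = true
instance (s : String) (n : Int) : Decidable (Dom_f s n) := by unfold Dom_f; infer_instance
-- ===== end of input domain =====

-- B replaces A's nested range-update loops by a single prefix/suffix counting pass
-- (objective: faster; a timing run measures it).

-- ===== PORT A =====
-- literal port of A: h = [1]*n; for each k, bump h[k+1:] if s[k] == 'L', else bump h[:k]
def f (s : String) (n : Int) : List Int :=
  (PySem.List.pyRange 0 n 1).foldl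
    (fun h k =>
      if PySem.Str.pyGet? s k = some 'L' then
        (PySem.List.pyRange (k+1) n 1).foldl (fun h' a => h'.modify a.toNat (· + 1)) h
      else
        (PySem.List.pyRange 0 k 1).foldl (fun h' b => h'.modify b.toNat (· + 1)) h)
    (List.replicate n.toNat 1)

-- ===== PORT B =====
-- literal port of Source B: total = #non-'L' among s[:n]; one pass over k in range(n)
-- carrying (res, lefts, seen) and appending 1 + lefts + total - seen
def f_alt (s : String) (n : Int) : List Int :=
  let total : Int :=
    (PySem.List.pyRange 0 n 1).foldl
      (fun acc k => if PySem.Str.pyGet? s k ≠ some 'L' then acc + 1 else acc) 0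
  ((PySem.List.pyRange 0 n 1).foldl
    (fun (st : List Int × Int × Int) k =>
      let seen := if PySem.Str.pyGet? s k ≠ some 'L' then st.2.2 + 1 else st.2.2
      let res := st.1 ++ [1 + st.2.1 + total - seen]
      let lefts := if PySem.Str.pyGet? s k = some 'L' then st.2.1 + 1 else st.2.1
      (res, lefts, seen))
    ([], 0, 0)).1

-- ===== PRECONDITION & SPEC =====
-- Pre_ excludes exactly the inputs where Python A raises IndexError (n > len(s)).
def Pre_f (s : String) (n : Int) : Prop := n ≤ PySem.Str.len s
instance (s : String) (n : Int) : Decidable (Pre_f s n) := by unfold Pre_f; infer_instance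
def pvWitness_f : String × Int := ("LRL", 3)

def Spec_f (s : String) (n : Int) (out : List Int) : Prop := out = f_alt s n
instance (s : String) (n : Int) (out : List Int) : Decidable (Spec_f s n out) := by unfold Spec_f; infer_instance

-- ===== CLAIM (what is proved, stated in full; the proofs are below) =====
def Claim_equal_f : Prop := ∀ (s : String) (n : Int), Dom_f s n → Pre_f s n → Spec_f s n (f s n)

-- ===== LEMMAS AND PROOFS =====

-- count of 'L' / of non-'L' characters, as Int
def cntL (l : List Char) : Int := (l.countP (fun c => c == 'L') : Int)
def cntR (l : List Char) : Int := (l.countP (fun c => !(c == 'L')) : Int)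

theorem bump_getElem? (a b : Int) (l : List Int) (ha : 0 ≤ a) (i : Nat) :
    ((PySem.List.pyRange a b 1).foldl (fun h' x => h'.modify x.toNat (· + 1)) l)[i]?
      = if a ≤ (i : Int) ∧ (i : Int) < b then l[i]?.map (· + 1) else l[i]? := by
  obtain ⟨fuel, hfuel⟩ : ∃ fuel, (b - a).toNat = fuel := ⟨_, rfl⟩
  induction fuel generalizing a l with
  | zero =>
    have hab : b ≤ a := by omega
    rw [PySem.List.pyRange_one_eq_nil hab]
    simp only [List.foldl_nil]
    have : ¬ (a ≤ (i : Int) ∧ (i : Int) < b) := by omega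
    simp [this]
  | succ fuel ih =>
    have hab : a < b := by omega
    rw [PySem.List.pyRange_one_cons hab]
    simp only [List.foldl_cons]
    rw [ih (a+1) _ (by omega) (by omega)]
    rw [List.getElem?_modify]
    rcases hli : l[i]? with _ | x
    · simp
    · by_cases hia : a.toNat = i
      · have : ¬ (a + 1 ≤ (i:Int) ∧ (i:Int) < b) := by omega
        have h2 : a ≤ (i:Int) ∧ (i:Int) < b := by omega
        simp [h2, hia]; omega
      · by_cases h3 : a + 1 ≤ (i:Int) ∧ (i:Int) < b
        · have h4 : a ≤ (i:Int) ∧ (i:Int) < b := by omega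
          simp [h4, hia]; omega
        · have h4 : ¬ (a ≤ (i:Int) ∧ (i:Int) < b) := by omega
          simp [h4, hia]; omega

theorem foldl_modify_length (xs : List Int) (l : List Int) :
    (xs.foldl (fun h' x => h'.modify x.toNat (· + 1)) l).length = l.length := by
  induction xs generalizing l with
  | nil => rfl
  | cons x xs ih => simp [List.foldl_cons, ih, List.length_modify]

theorem A_loop_length (s : String) (N : Nat) (m : Nat) :
    ((PySem.List.pyRange 0 (m : Int) 1).foldl
      (fun h k =>
        if PySem.Str.pyGet? s k = some 'L' then
          (PySem.List.pyRange (k+1) (N : Int) 1).foldl (fun h' a => h'.modify a.toNat (· + 1)) h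
        else
          (PySem.List.pyRange 0 k 1).foldl (fun h' b => h'.modify b.toNat (· + 1)) h)
      ((List.replicate N 1 : List Int))).length = N := by
  suffices h : ∀ (ks : List Int) (l : List Int),
      (ks.foldl (fun h k =>
        if PySem.Str.pyGet? s k = some 'L' then
          (PySem.List.pyRange (k+1) (N : Int) 1).foldl (fun h' a => h'.modify a.toNat (· + 1)) h
        else
          (PySem.List.pyRange 0 k 1).foldl (fun h' b => h'.modify b.toNat (· + 1)) h) l).length
      = l.length by
    exact (h _ _).trans (List.length_replicate)
  intro ks
  induction ks with
  | nil => intro l; rfl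
  | cons k ks ih =>
    intro l
    simp only [List.foldl_cons]
    rw [ih]
    split <;> rw [foldl_modify_length]

theorem A_loop (s : String) (N : Nat) (hN : N ≤ s.toList.length) (m : Nat) (hm : m ≤ N)
    (i : Nat) (hi : i < N) :
    ((PySem.List.pyRange 0 (m : Int) 1).foldl
      (fun h k =>
        if PySem.Str.pyGet? s k = some 'L' then
          (PySem.List.pyRange (k+1) (N : Int) 1).foldl (fun h' a => h'.modify a.toNat (· + 1)) h
        else
          (PySem.List.pyRange 0 k 1).foldl (fun h' b => h'.modify b.toNat (· + 1)) h)
      ((List.replicate N 1 : List Int)))[i]?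
    = some (1 + cntL ((s.toList.take N).take (min i m))
              + cntR (((s.toList.take N).take m).drop (i+1))) := by
  induction m with
  | zero =>
    rw [show ((0:Nat):Int) = 0 by rfl, PySem.List.pyRange_one_eq_nil (by omega)]
    simp [cntL, cntR, hi]
  | succ m ih =>
    have hmN : m < N := by omega
    have hmlen : m < s.toList.length := by omega
    have hlen : ((s.toList.take N).take m).length = m := by
      rw [List.length_take, List.length_take]; omega
    have hcast : ((m+1 : Nat) : Int) = ((m : Nat) : Int) + 1 := by push_cast; ring
    rw [hcast, PySem.List.pyRange_one_succ_right (by positivity), List.foldl_append]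
    simp only [List.foldl_cons, List.foldl_nil]
    have hget : PySem.Str.pyGet? s ((m : Nat) : Int) = some s.toList[m] := by
      rw [PySem.Str.pyGet?_natCast, List.getElem?_eq_getElem hmlen]
    have hum : (s.toList.take N)[m]? = some s.toList[m] := by
      rw [List.getElem?_take]; simp [hmN, List.getElem?_eq_getElem hmlen]
    have htake : (s.toList.take N).take (m+1) = (s.toList.take N).take m ++ [s.toList[m]] := by
      rw [List.take_add_one, hum]; rfl
    by_cases hL : s.toList[m] = 'L'
    · rw [if_pos (by rw [hget, hL])]
      rw [bump_getElem? _ _ _ (by positivity) i, ih (by omega)]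
      by_cases him : (i : Int) ≥ (m:Int) + 1
      · rw [if_pos ⟨him, by exact_mod_cast hi⟩]
        have h1 : min i m = m := by omega
        have h2 : min i (m+1) = m + 1 := by omega
        have h3 : cntL ((s.toList.take N).take (m+1)) = cntL ((s.toList.take N).take m) + 1 := by
          rw [htake]; simp [cntL, List.countP_append, hL]
        have h4 : ((s.toList.take N).take (m+1)).drop (i+1) =
            ((s.toList.take N).take m).drop (i+1) := by
          rw [List.drop_eq_nil_of_le (by rw [List.length_take, List.length_take]; omega),
              List.drop_eq_nil_of_le (by rw [List.length_take, List.length_take]; omega)]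
        rw [h1, h2, h3, h4]
        simp; ring
      · rw [if_neg (by omega)]
        have h1 : min i (m+1) = min i m := by omega
        have h4 : cntR (((s.toList.take N).take (m+1)).drop (i+1))
            = cntR (((s.toList.take N).take m).drop (i+1)) := by
          by_cases him2 : i < m
          · rw [htake, List.drop_append, hlen, show i+1-m = 0 by omega, List.drop_zero]
            simp [cntR, List.countP_append, hL]
          · have hieq : i = m := by omega
            subst hieq
            rw [List.drop_eq_nil_of_le (by rw [List.length_take, List.length_take]; omega),
                List.drop_eq_nil_of_le (by rw [List.length_take, List.length_take]; omega)]
        rw [h1, h4]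
    · rw [if_neg (by rw [hget]; simp [hL])]
      rw [bump_getElem? _ _ _ (by omega) i, ih (by omega)]
      by_cases him : (i : Int) < (m:Int)
      · rw [if_pos ⟨by omega, him⟩]
        have h1 : min i (m+1) = min i m := by omega
        have h4 : ((s.toList.take N).take (m+1)).drop (i+1) =
            ((s.toList.take N).take m).drop (i+1) ++ [s.toList[m]] := by
          rw [htake, List.drop_append, hlen, show i+1-m = 0 by omega, List.drop_zero]
        rw [h1, h4]
        simp [cntR, List.countP_append, hL]
        ring
      · rw [if_neg (by omega)]
        have h1 : cntL ((s.toList.take N).take (min i (m+1)))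
            = cntL ((s.toList.take N).take (min i m)) := by
          by_cases hi2 : i ≤ m
          · rw [show min i (m+1) = min i m by omega]
          · rw [show min i (m+1) = m+1 by omega, show min i m = m by omega, htake]
            simp [cntL, List.countP_append, hL]
        have h4 : ((s.toList.take N).take (m+1)).drop (i+1) =
            ((s.toList.take N).take m).drop (i+1) := by
          rw [List.drop_eq_nil_of_le (by rw [List.length_take, List.length_take]; omega),
              List.drop_eq_nil_of_le (by rw [List.length_take, List.length_take]; omega)]
        rw [h1, h4]

theorem B_total (s : String) (N : Nat) (hN : N ≤ s.toList.length) :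
    ((PySem.List.pyRange 0 (N : Int) 1).foldl
      (fun acc k => if PySem.Str.pyGet? s k ≠ some 'L' then acc + 1 else acc) (0 : Int))
    = cntR (s.toList.take N) := by
  induction N with
  | zero => simp [cntR, PySem.List.pyRange_one_eq_nil]
  | succ m ih =>
    have hmlen : m < s.toList.length := by omega
    have hget : PySem.Str.pyGet? s ((m : Nat) : Int) = some s.toList[m] := by
      rw [PySem.Str.pyGet?_natCast, List.getElem?_eq_getElem hmlen]
    have htake : s.toList.take (m+1) = s.toList.take m ++ [s.toList[m]] := by
      rw [List.take_add_one, List.getElem?_eq_getElem hmlen]; rfl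
    rw [show ((m+1 : Nat) : Int) = ((m : Nat) : Int) + 1 by push_cast; ring,
        PySem.List.pyRange_one_succ_right (by positivity), List.foldl_append]
    simp only [List.foldl_cons, List.foldl_nil]
    rw [ih (by omega), hget]
    simp only [cntR, htake, List.countP_append]
    by_cases hL : s.toList[m] = 'L' <;> simp [hL]

theorem B_loop (s : String) (N : Nat) (hN : N ≤ s.toList.length) (total : Int) (m : Nat)
    (hm : m ≤ N) :
    ((PySem.List.pyRange 0 (m : Int) 1).foldl
      (fun (st : List Int × Int × Int) k =>
        let seen := if PySem.Str.pyGet? s k ≠ some 'L' then st.2.2 + 1 else st.2.2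
        let res := st.1 ++ [1 + st.2.1 + total - seen]
        let lefts := if PySem.Str.pyGet? s k = some 'L' then st.2.1 + 1 else st.2.1
        (res, lefts, seen))
      (([], 0, 0) : List Int × Int × Int))
    = ((List.range m).map (fun i =>
          1 + cntL (s.toList.take i) + total - cntR (s.toList.take (i+1))),
       cntL (s.toList.take m), cntR (s.toList.take m)) := by
  induction m with
  | zero => simp [cntL, cntR, PySem.List.pyRange_one_eq_nil]
  | succ m ih =>
    have hmlen : m < s.toList.length := by omega
    have hget : PySem.Str.pyGet? s ((m : Nat) : Int) = some s.toList[m] := by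
      rw [PySem.Str.pyGet?_natCast, List.getElem?_eq_getElem hmlen]
    have htake : s.toList.take (m+1) = s.toList.take m ++ [s.toList[m]] := by
      rw [List.take_add_one, List.getElem?_eq_getElem hmlen]; rfl
    rw [show ((m+1 : Nat) : Int) = ((m : Nat) : Int) + 1 by push_cast; ring,
        PySem.List.pyRange_one_succ_right (by positivity), List.foldl_append]
    simp only [List.foldl_cons, List.foldl_nil]
    rw [ih (by omega)]
    have hcL : cntL (s.toList.take (m+1))
        = cntL (s.toList.take m) + (if s.toList[m] = 'L' then 1 else 0) := by
      simp only [cntL, htake, List.countP_append]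
      by_cases hL : s.toList[m] = 'L' <;> simp [hL]
    have hcR : cntR (s.toList.take (m+1))
        = cntR (s.toList.take m) + (if s.toList[m] = 'L' then 0 else 1) := by
      simp only [cntR, htake, List.countP_append]
      by_cases hL : s.toList[m] = 'L' <;> simp [hL]
    simp only [hget, List.range_succ, List.map_append, List.map_cons, List.map_nil]
    by_cases hL : s.toList[m] = 'L' <;>
      simp [hcL, hcR, hL]

theorem f_eq (s : String) (n : Int) (hpre : Pre_f s n) : f s n = f_alt s n := by
  unfold f f_alt
  by_cases hn : n < 0
  · rw [PySem.List.pyRange_one_eq_nil (by omega)]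
    simp [Int.toNat_of_nonpos (by omega : n ≤ 0)]
  · obtain ⟨N, rfl⟩ : ∃ N : Nat, n = (N : Int) := ⟨n.toNat, (Int.toNat_of_nonneg (by omega)).symm⟩
    have hN : N ≤ s.toList.length := by
      unfold Pre_f at hpre; rw [PySem.Str.len_eq] at hpre; exact_mod_cast hpre
    rw [B_total s N hN]
    simp only [B_loop s N hN (cntR (s.toList.take N)) N le_rfl, Int.toNat_natCast]
    apply List.ext_getElem?
    intro i
    by_cases hi : i < N
    · rw [A_loop s N hN N le_rfl i hi]
      rw [List.getElem?_map, List.getElem?_range hi]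
      simp only [Option.map_some]
      congr 1
      have h1 : (s.toList.take N).take (min i N) = s.toList.take i := by
        rw [List.take_take, show min (min i N) N = i by omega]
      have h2 : (s.toList.take N).take N = s.toList.take N := by
        rw [List.take_take, min_self]
      have h3 : cntR (s.toList.take N) = cntR (s.toList.take (i+1))
          + cntR ((s.toList.take N).drop (i+1)) := by
        conv_lhs => rw [← List.take_append_drop (i+1) (s.toList.take N)]
        unfold cntR
        rw [List.countP_append, List.take_take, show min (i+1) N = i+1 by omega]
        push_cast; ring
      rw [h1, h2]
      omega
    · rw [List.getElem?_eq_none (le_of_eq_of_le (A_loop_length s N N) (by omega)),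
          List.getElem?_eq_none (by simp; omega)]

-- ===== VERDICT (by name: the statement is the Claim_ definition above) =====
theorem f_spec : Claim_equal_f := by
  intro s n _ hpre
  exact f_eq s n hpre
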